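-- pv_equiv track=rewrite | github.com/VerifiableRobotics/LTL_stack | rqt_grounding_and_analysis/src/rqt_grounding_and_analysis/my_module.py | get_ltl_suggestion
-- ===== SOURCE A (Python) =====
-- import copy
--
-- def get_ltl_suggestion(output_full_list):
--     full_ltl_list = []
--     for idx, otuput_prop in enumerate(output_full_list):
--         temp_list = copy.deepcopy(output_full_list)
--         temp_list[idx] = "not "+temp_list[idx]
--         full_ltl_list.append(temp_list)
--
--     # everything can be false
--     temp_list = copy.deepcopy(output_full_list)
--     temp_list = ["not "+x for x in temp_list]
--     full_ltl_list.append(temp_list)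
--
--     # form ltl string
--     ltl_str = "always ("+ " or ".join("("+" and ".join(prop for prop in prop_list)+")" for prop_list in full_ltl_list)+")"
--
--     return ltl_str
-- ===== SOURCE B (Python) =====
-- def get_ltl_suggestion(output_full_list):
--     # Recursive back-to-front construction: for each suffix return the inner
--     # conjunction strings with one prop negated, the plain conjunction, and the
--     # all-negated conjunction; no list-of-lists table, no deepcopy.
--     def go(rest):
--         if not rest:
--             return [], '', ''
--         p, tail = rest[0], rest[1:]
--         inners, joined, neg = go(tail)
--         if not tail:
--             return ['not ' + p], p, 'not ' + p
--         return (['not ' + p + ' and ' + joined] + [p + ' and ' + s for s in inners],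
--                 p + ' and ' + joined,
--                 'not ' + p + ' and ' + neg)
--
--     inners, _, neg = go(output_full_list)
--     clauses = ['(' + s + ')' for s in inners + [neg]]
--     return 'always (' + ' or '.join(clauses) + ')'
-- ===== Notes on version B (the rewrite author's own statement) =====
-- stated objective: alternative
-- what changed: Replaces A's list-of-lists table (a deepcopy plus one mutated slot per index, then a join of joins) with a single back-to-front structural recursion that returns finished conjunction strings directly, so the table, the deepcopies and the per-clause inner join disappear.
import Mathlib
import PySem

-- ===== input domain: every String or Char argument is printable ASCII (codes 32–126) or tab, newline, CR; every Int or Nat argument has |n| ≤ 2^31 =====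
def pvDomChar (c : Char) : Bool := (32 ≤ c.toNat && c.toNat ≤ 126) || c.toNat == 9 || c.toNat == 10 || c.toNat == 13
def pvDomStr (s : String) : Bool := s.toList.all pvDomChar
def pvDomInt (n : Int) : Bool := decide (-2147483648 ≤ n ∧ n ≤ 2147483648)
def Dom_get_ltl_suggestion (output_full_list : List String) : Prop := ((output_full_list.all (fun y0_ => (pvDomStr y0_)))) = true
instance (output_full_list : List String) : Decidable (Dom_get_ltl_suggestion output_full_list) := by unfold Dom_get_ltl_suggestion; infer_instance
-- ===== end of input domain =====

-- B replaces A's list-of-lists table (one deep copy + one mutated slot per index,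
-- then a join of joins) by a single back-to-front structural recursion that returns
-- finished conjunction strings directly; objective: alternative decomposition.

-- ===== PORT A =====
def get_ltl_suggestion (output_full_list : List String) : String :=
  -- full_ltl_list built by the enumerate loop: deepcopy + temp_list[idx] = "not "+temp_list[idx]
  let full1 : List (List String) :=
    (PySem.List.enumerate output_full_list).foldl
      (fun acc ip => acc ++ [output_full_list.set ip.1.toNat ("not " ++ ip.2)]) []
  -- everything can be false
  let full2 : List (List String) := full1 ++ [output_full_list.map (fun x => "not " ++ x)]
  -- form ltl string
  "always (" ++
    PySem.Str.join " or " (full2.map (fun pl => "(" ++ PySem.Str.join " and " pl ++ ")")) ++ ")"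

-- ===== PORT B =====
-- go(rest) of Source B: (inner one-negated conjunction strings, plain conjunction, all-negated conjunction)
def pvGoB : List String → List String × String × String
  | [] => ([], "", "")
  | p :: tail =>
    let r := pvGoB tail
    if tail = [] then (["not " ++ p], p, "not " ++ p)
    else (("not " ++ p ++ " and " ++ r.2.1) :: r.1.map (fun s => p ++ " and " ++ s),
          p ++ " and " ++ r.2.1,
          "not " ++ p ++ " and " ++ r.2.2)

def get_ltl_suggestion_alt (output_full_list : List String) : String :=
  let r := pvGoB output_full_list
  let clauses := (r.1 ++ [r.2.2]).map (fun s => "(" ++ s ++ ")")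
  "always (" ++ PySem.Str.join " or " clauses ++ ")"

-- ===== PRECONDITION & SPEC =====
def Spec_get_ltl_suggestion (output_full_list : List String) (out : String) : Prop := out = get_ltl_suggestion_alt output_full_list
instance (output_full_list : List String) (out : String) : Decidable (Spec_get_ltl_suggestion output_full_list out) := by unfold Spec_get_ltl_suggestion; infer_instance

-- ===== CLAIM (what is proved, stated in full; the proofs are below) =====
def Claim_equal_get_ltl_suggestion : Prop := ∀ (output_full_list : List String), Dom_get_ltl_suggestion output_full_list → Spec_get_ltl_suggestion output_full_list (get_ltl_suggestion output_full_list)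

-- ===== LEMMAS AND PROOFS =====

-- A's table, in map form (what the enumerate loop builds)
def pvTableA (l : List String) : List (List String) :=
  (PySem.List.enumerate l).map (fun ip => l.set ip.1.toNat ("not " ++ ip.2))

theorem pvJoin_singleton (sep a : String) : PySem.Str.join sep [a] = a := by
  simp [PySem.Str.join, PySem.Chars.join, List.intercalate]

theorem pvJoin_cons_cons (sep a b : String) (t : List String) :
    PySem.Str.join sep (a :: b :: t) = a ++ sep ++ PySem.Str.join sep (b :: t) := by
  apply String.toList_inj.mp
  simp [PySem.Str.toList_join, PySem.Chars.join_cons_cons, String.toList_append]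

theorem pvGoB_single (p : String) : pvGoB [p] = (["not " ++ p], p, "not " ++ p) := by
  simp [pvGoB]

theorem pvGoB_cons_cons (p x : String) (t : List String) :
    pvGoB (p :: x :: t) =
      (("not " ++ p ++ " and " ++ (pvGoB (x :: t)).2.1) ::
         (pvGoB (x :: t)).1.map (fun s => p ++ " and " ++ s),
       p ++ " and " ++ (pvGoB (x :: t)).2.1,
       "not " ++ p ++ " and " ++ (pvGoB (x :: t)).2.2) := by
  conv_lhs => rw [pvGoB]
  simp

theorem pvEnumerate_eq_shift (l : List String) (s : Int) :
    PySem.List.enumerate l s = (PySem.List.enumerate l 0).map (fun q => (q.1 + s, q.2)) := by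
  induction l generalizing s with
  | nil => simp [PySem.List.enumerate_nil]
  | cons x xs ih =>
    rw [PySem.List.enumerate_cons, PySem.List.enumerate_cons, List.map_cons]
    rw [ih (s + 1), ih (0 + 1), List.map_map]
    refine congrArg₂ _ (by simp) (List.map_congr_left ?_)
    intro q _
    simp [Function.comp]
    omega

theorem pvTableA_cons (p : String) (tail : List String) :
    pvTableA (p :: tail) =
      (("not " ++ p) :: tail) :: (pvTableA tail).map (fun pl => p :: pl) := by
  unfold pvTableA
  rw [PySem.List.enumerate_cons, List.map_cons]
  congr 1
  rw [pvEnumerate_eq_shift tail, List.map_map, List.map_map]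
  apply List.map_congr_left
  intro q hq
  rcases (PySem.List.mem_enumerate_iff _ _ _).1 hq with ⟨k, hk, rfl⟩
  have h1 : (((0 : Int) + (k : Int)) + (0 + 1)).toNat = ((0 : Int) + (k : Int)).toNat + 1 := by omega
  simp only [Function.comp_apply, h1, List.set_cons_succ]

theorem pvGoB_joined (l : List String) :
    (pvGoB l).2.1 = PySem.Str.join " and " l := by
  induction l with
  | nil => rfl
  | cons p tail ih =>
    cases tail with
    | nil => rw [pvGoB_single, pvJoin_singleton]
    | cons x t =>
      rw [pvGoB_cons_cons]
      show p ++ " and " ++ (pvGoB (x :: t)).2.1 = _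
      rw [ih, pvJoin_cons_cons]

theorem pvGoB_neg (l : List String) :
    (pvGoB l).2.2 = PySem.Str.join " and " (l.map (fun x => "not " ++ x)) := by
  induction l with
  | nil => rfl
  | cons p tail ih =>
    cases tail with
    | nil => rw [pvGoB_single]; simp [pvJoin_singleton]
    | cons x t =>
      rw [pvGoB_cons_cons]
      show "not " ++ p ++ " and " ++ (pvGoB (x :: t)).2.2 = _
      rw [ih]
      simp only [List.map_cons]
      rw [pvJoin_cons_cons]

theorem pvTableA_ne_nil (l : List String) : ∀ pl ∈ pvTableA l, pl ≠ [] := by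
  intro pl h hc
  unfold pvTableA at h
  rcases List.mem_map.1 h with ⟨ip, hip, rfl⟩
  rcases (PySem.List.mem_enumerate_iff _ _ _).1 hip with ⟨k, hk, rfl⟩
  have hlen : l.length = 0 := by simpa using congrArg List.length hc
  omega

theorem pvGoB_inners (l : List String) :
    (pvGoB l).1 = (pvTableA l).map (fun pl => PySem.Str.join " and " pl) := by
  induction l with
  | nil => rfl
  | cons p tail ih =>
    rw [pvTableA_cons, List.map_cons, List.map_map]
    cases tail with
    | nil => rw [pvGoB_single]; simp [pvTableA, pvJoin_singleton, PySem.List.enumerate_nil]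
    | cons x t =>
      have htail : PySem.Str.join " and " (("not " ++ p) :: x :: t) =
          "not " ++ p ++ " and " ++ (pvGoB (x :: t)).2.1 := by
        rw [pvJoin_cons_cons, pvGoB_joined]
      have hmap : (pvTableA (x :: t)).map ((fun pl => PySem.Str.join " and " pl) ∘ (fun pl => p :: pl)) =
          (pvGoB (x :: t)).1.map (fun s => p ++ " and " ++ s) := by
        rw [ih, List.map_map]
        apply List.map_congr_left
        intro pl hpl
        cases pl with
        | nil => exact absurd rfl (pvTableA_ne_nil _ _ hpl)
        | cons y ys => simp [Function.comp, pvJoin_cons_cons]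
      rw [pvGoB_cons_cons, htail, hmap]

-- ===== VERDICT (by name: the statement is the Claim_ definition above) =====
theorem get_ltl_suggestion_spec : Claim_equal_get_ltl_suggestion := by
  intro l _
  unfold Spec_get_ltl_suggestion get_ltl_suggestion get_ltl_suggestion_alt
  rw [PySem.List.foldl_append_singleton_eq_map]
  have hi := pvGoB_inners l
  have hn := pvGoB_neg l
  unfold pvTableA at hi
  simp [hi, hn, List.map_map, Function.comp_def]
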